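-- pv_equiv track=rewrite | github.com/xxezin/Algorithm | data structure/graph/pro 순위.py | solution
-- ===== SOURCE A (Python) =====
-- def solution(n, results):
--     answer = 0
--     A = [[] for _ in range(n+1)]
--     for i,j in results:
--         A[i].append([j,-1]) # 진 쪽
--         A[j].append([i,1]) # 이긴 쪽
--
--     lst = []
--     for i in range(1,n+1):
--         if len(A[i]) == n-1:
--             answer += 1
--             lst.append(i)
--             for j in A[i]:
--                 if j[1] == -1 and j not in lst:
--                     answer += 1
--                     lst.append(j[0])
--
--     return answer
-- ===== SOURCE B (Python) =====
-- def solution(n, results):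
--     played = [0] * (n + 1)
--     lost = [0] * (n + 1)
--     for i, j in results:
--         played[i] += 1
--         played[j] += 1
--         lost[i] += 1
--     return sum(1 + lost[i] for i in range(1, n + 1) if played[i] == n - 1)
-- ===== Notes on version B (the rewrite author's own statement) =====
-- stated objective: simpler
-- what changed: Replaced the adjacency list of tagged pairs and the nested inner scan (whose membership test 'j not in lst' is vacuous, list vs ints) by one counting pass filling played/lost integer arrays plus a closed summation over 1..n.
import Mathlib
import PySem

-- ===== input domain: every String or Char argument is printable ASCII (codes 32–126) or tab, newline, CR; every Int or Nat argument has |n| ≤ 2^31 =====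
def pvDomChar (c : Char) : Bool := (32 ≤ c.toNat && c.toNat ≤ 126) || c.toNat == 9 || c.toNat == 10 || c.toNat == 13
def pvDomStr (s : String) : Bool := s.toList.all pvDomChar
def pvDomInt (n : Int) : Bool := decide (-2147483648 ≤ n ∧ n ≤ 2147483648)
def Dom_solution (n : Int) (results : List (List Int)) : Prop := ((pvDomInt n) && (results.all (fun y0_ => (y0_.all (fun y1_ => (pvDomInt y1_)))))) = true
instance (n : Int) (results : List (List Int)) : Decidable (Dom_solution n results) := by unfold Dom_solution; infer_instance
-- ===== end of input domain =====

-- B replaces A's adjacency list of tagged pairs and nested inner scan by one counting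
-- pass (played/lost arrays) and a single summation over 1..n (objective: simpler).

-- ===== PORT A =====
-- Python values stored in A's 'lst' (ints) compared against the two-element lists in A[i]:
-- a dynamic-typed value, modelled exactly by a sum of the two shapes that occur.
inductive PyV
  | int : Int → PyV
  | pair : Int → Int → PyV
deriving DecidableEq, Repr

-- for i,j in results: A[i].append([j,-1]); A[j].append([i,1])
def solAStep (A : List (List (Int × Int))) (row : List Int) : List (List (Int × Int)) :=
  let i := PySem.List.pyGetD row 0 0
  let j := PySem.List.pyGetD row 1 0
  let A1 := PySem.List.pySetD A i (PySem.List.pyGetD A i [] ++ [(j, -1)])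
  PySem.List.pySetD A1 j (PySem.List.pyGetD A1 j [] ++ [(i, 1)])

-- inner loop body: if j[1] == -1 and j not in lst: answer += 1; lst.append(j[0])
def solAInner (st : Int × List PyV) (j : Int × Int) : Int × List PyV :=
  if j.2 == -1 && !(st.2.contains (PyV.pair j.1 j.2)) then (st.1 + 1, st.2 ++ [PyV.int j.1])
  else st

def solution (n : Int) (results : List (List Int)) : Int :=
  let A := results.foldl solAStep (List.replicate (n + 1).toNat [])
  let st := (PySem.List.pyRange 1 (n + 1) 1).foldl
    (fun (st : Int × List PyV) i =>
      let Ai := PySem.List.pyGetD A i []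
      if ((Ai.length : Int) == n - 1) then
        (Ai.foldl solAInner (st.1 + 1, st.2 ++ [PyV.int i]))
      else st)
    (0, ([] : List PyV))
  st.1

-- ===== PORT B =====
-- for i,j in results: played[i]+=1; played[j]+=1; lost[i]+=1
def solBStep (st : List Int × List Int) (row : List Int) : List Int × List Int :=
  let i := PySem.List.pyGetD row 0 0
  let j := PySem.List.pyGetD row 1 0
  let played1 := PySem.List.pySetD st.1 i (PySem.List.pyGetD st.1 i 0 + 1)
  let played2 := PySem.List.pySetD played1 j (PySem.List.pyGetD played1 j 0 + 1)
  let lost1 := PySem.List.pySetD st.2 i (PySem.List.pyGetD st.2 i 0 + 1)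
  (played2, lost1)

def solution_alt (n : Int) (results : List (List Int)) : Int :=
  let st := results.foldl solBStep
    (List.replicate (n + 1).toNat 0, List.replicate (n + 1).toNat 0)
  (PySem.List.pyRange 1 (n + 1) 1).foldl
    (fun acc i =>
      if (PySem.List.pyGetD st.1 i 0 == n - 1) then acc + (1 + PySem.List.pyGetD st.2 i 0)
      else acc)
    0

-- ===== PRECONDITION & SPEC =====
-- Pre_ excludes exactly the inputs where the Python A raises: a row that is not an
-- [i, j] pair (unpacking ValueError) or whose entries are out of range as indices into
-- the length-(n+1) list (IndexError); B raises identically there.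
def Pre_solution (n : Int) (results : List (List Int)) : Prop :=
  ∀ row ∈ results, row.length = 2 ∧
    ∀ x ∈ row, PySem.Raise.InRange (n + 1).toNat x
instance (n : Int) (results : List (List Int)) : Decidable (Pre_solution n results) := by
  unfold Pre_solution; infer_instance

def pvWitness_solution : Int × List (List Int) := (3, [[1, 2], [1, 3], [2, 3]])

def Spec_solution (n : Int) (results : List (List Int)) (out : Int) : Prop := out = solution_alt n results
instance (n : Int) (results : List (List Int)) (out : Int) : Decidable (Spec_solution n results out) := by unfold Spec_solution; infer_instance

-- ===== CLAIM (what is proved, stated in full; the proofs are below) =====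
def Claim_equal_solution : Prop := ∀ (n : Int) (results : List (List Int)), Dom_solution n results → Pre_solution n results → Spec_solution n results (solution n results)

-- ===== LEMMAS AND PROOFS =====

-- the Nat index a valid Python index i denotes in a list of length L
def pyN (L : Nat) (i : Int) : Nat := if 0 ≤ i then i.toNat else L - (-i).toNat

theorem pyIdx_eq_pyN (L : Nat) (i : Int) (h : PySem.Raise.InRange L i) :
    PySem.List.pyIdx? L i = some (pyN L i) := by
  obtain ⟨h1, h2⟩ := h
  simp only [PySem.List.pyIdx?, pyN]
  by_cases h0 : 0 ≤ i
  · simp [h0, h2]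
  · simp [h0, h1]

theorem pyN_lt (L : Nat) (i : Int) (h : PySem.Raise.InRange L i) : pyN L i < L := by
  obtain ⟨h1, h2⟩ := h
  simp only [pyN]
  split_ifs with h0 <;> omega

theorem pyGetD_inRange {α : Type} (xs : List α) (i : Int) (d : α)
    (h : PySem.Raise.InRange xs.length i) :
    PySem.List.pyGetD xs i d = xs.getD (pyN xs.length i) d := by
  simp [PySem.List.pyGetD, PySem.List.pyGet?, pyIdx_eq_pyN _ _ h, List.getD]

theorem pySetD_inRange {α : Type} (xs : List α) (i : Int) (v : α)
    (h : PySem.Raise.InRange xs.length i) :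
    PySem.List.pySetD xs i v = xs.set (pyN xs.length i) v := by
  simp [PySem.List.pySetD, PySem.List.pySet?, pyIdx_eq_pyN _ _ h]

theorem pyGetD_nonneg {α : Type} (xs : List α) (i : Int) (d : α) (h : 0 ≤ i) :
    PySem.List.pyGetD xs i d = xs.getD i.toNat d := by
  simp only [PySem.List.pyGetD, PySem.List.pyGet?, PySem.List.pyIdx?, if_pos h]
  split_ifs with hlt
  · simp [List.getD]
  · have : xs.length ≤ i.toNat := by omega
    simp [List.getD, List.getElem?_eq_none this]

theorem getD_set {α : Type} (xs : List α) (m : Nat) (v : α) (d : α) (hm : m < xs.length) :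
    ∀ k : Nat, (xs.set m v).getD k d = if k = m then v else xs.getD k d := by
  intro k
  by_cases hk : k = m
  · subst hk; simp [List.getD, List.getElem?_set, hm]
  · simp [List.getD, List.getElem?_set_ne (by omega : m ≠ k), hk]

-- the fold-invariant relating A's adjacency array to B's counting arrays
def CInv (L : Nat) (A : List (List (Int × Int))) (played lost : List Int) : Prop :=
  A.length = L ∧ played.length = L ∧ lost.length = L ∧
  ∀ k : Nat, ((A.getD k []).length : Int) = played.getD k 0 ∧
    ((A.getD k []).countP (fun p => p.2 == -1) : Int) = lost.getD k 0

theorem CInv_init (L : Nat) :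
    CInv L (List.replicate L []) (List.replicate L 0) (List.replicate L 0) := by
  refine ⟨by simp, by simp, by simp, fun k => ?_⟩
  by_cases hk : k < L
  · simp [List.getD, hk]
  · have : L ≤ k := by omega
    simp [List.getD, List.getElem?_eq_none, this]

theorem CInv_step (L : Nat) (A : List (List (Int × Int))) (played lost : List Int)
    (row : List Int) (hInv : CInv L A played lost)
    (hrow : row.length = 2 ∧ ∀ x ∈ row, PySem.Raise.InRange L x) :
    CInv L (solAStep A row) (solBStep (played, lost) row).1 (solBStep (played, lost) row).2 := by
  obtain ⟨hA, hP, hLo, hK⟩ := hInv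
  obtain ⟨hlen, hmem⟩ := hrow
  have h0 : PySem.List.pyGetD row 0 0 ∈ row := by
    have h : PySem.Raise.InRange row.length 0 := by constructor <;> omega
    simpa using PySem.List.pyGetD_mem (xs := row) (i := 0) (d := 0) h
  have h1 : PySem.List.pyGetD row 1 0 ∈ row := by
    have h : PySem.Raise.InRange row.length 1 := by constructor <;> omega
    simpa using PySem.List.pyGetD_mem (xs := row) (i := 1) (d := 0) h
  set i := PySem.List.pyGetD row 0 0 with hi
  set j := PySem.List.pyGetD row 1 0 with hj
  have hiR : PySem.Raise.InRange L i := hmem _ h0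
  have hjR : PySem.Raise.InRange L j := hmem _ h1
  set ki := pyN L i with hki
  set kj := pyN L j with hkj
  have hkiL : ki < L := pyN_lt _ _ hiR
  have hkjL : kj < L := pyN_lt _ _ hjR
  simp only [solAStep, solBStep, ← hi, ← hj]
  rw [pyGetD_inRange A i [] (hA ▸ hiR), pySetD_inRange A i _ (hA ▸ hiR),
      pyGetD_inRange played i 0 (hP ▸ hiR), pySetD_inRange played i _ (hP ▸ hiR),
      pyGetD_inRange lost i 0 (hLo ▸ hiR), pySetD_inRange lost i _ (hLo ▸ hiR)]
  rw [hA, hP, hLo, ← hki]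
  have hA1len : (A.set ki (A.getD ki [] ++ [(j, -1)])).length = L := by simp [hA]
  have hP1len : (played.set ki (played.getD ki 0 + 1)).length = L := by simp [hP]
  rw [pyGetD_inRange _ j [] (hA1len ▸ hjR), pySetD_inRange _ j _ (hA1len ▸ hjR),
      pyGetD_inRange _ j 0 (hP1len ▸ hjR), pySetD_inRange _ j _ (hP1len ▸ hjR)]
  rw [hA1len, hP1len, ← hkj]
  refine ⟨by simp [hA], by simp [hP], by simp [hLo], ?_⟩
  intro k
  have hAki : ki < A.length := hA ▸ hkiL
  have hPki : ki < played.length := hP ▸ hkiL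
  have hLki : ki < lost.length := hLo ▸ hkiL
  have hAkj : kj < (A.set ki (A.getD ki [] ++ [(j, -1)])).length := by
    simpa [hA] using hkjL
  have hPkj : kj < (played.set ki (played.getD ki 0 + 1)).length := by
    simpa [hP] using hkjL
  obtain ⟨hKk1, hKk2⟩ := hK k
  obtain ⟨hKi1, hKi2⟩ := hK ki
  simp only [getD_set _ _ _ _ hAkj, getD_set _ _ _ _ hPkj, getD_set _ _ _ _ hAki,
    getD_set _ _ _ _ hPki, getD_set _ _ _ _ hLki]
  by_cases ekj : k = kj <;> by_cases eki : k = ki <;>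
    constructor <;>
      simp_all [List.countP_append, List.countP_cons, List.length_append] <;>
      (push_cast; omega)

theorem CInv_fold (L : Nat) (results : List (List Int)) (A : List (List (Int × Int)))
    (played lost : List Int) (hInv : CInv L A played lost)
    (hrows : ∀ row ∈ results, row.length = 2 ∧ ∀ x ∈ row, PySem.Raise.InRange L x) :
    CInv L (results.foldl solAStep A)
      (results.foldl solBStep (played, lost)).1 (results.foldl solBStep (played, lost)).2 := by
  induction results generalizing A played lost with
  | nil => simpa using hInv
  | cons r rs ih =>
    simp only [List.foldl_cons]
    have hstep := CInv_step L A played lost r hInv (hrows r (by simp))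
    have := ih _ _ _ hstep (fun row hm => hrows row (by simp [hm]))
    simpa using this

-- every element of lst is an int, so 'j not in lst' (j a pair) always holds
def AllInt (lst : List PyV) : Prop := ∀ v ∈ lst, ∃ m, v = PyV.int m

theorem inner_fold (Ai : List (Int × Int)) (ans : Int) (lst : List PyV) (h : AllInt lst) :
    (Ai.foldl solAInner (ans, lst)).1 = ans + (Ai.countP (fun p => p.2 == -1) : Int) ∧
    AllInt (Ai.foldl solAInner (ans, lst)).2 := by
  induction Ai generalizing ans lst with
  | nil => exact ⟨by simp, h⟩
  | cons p ps ih =>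
    have hnm : ¬ (PyV.pair p.1 p.2 ∈ lst) := by
      intro hm; obtain ⟨m, hv⟩ := h _ hm; exact PyV.noConfusion hv
    simp only [List.foldl_cons, solAInner, List.countP_cons]
    by_cases hp : p.2 == (-1 : Int)
    · have hcontains : lst.contains (PyV.pair p.1 p.2) = false := by
        simpa using hnm
      rw [if_pos (by simp [hp]; exact hnm)]
      have h' : AllInt (lst ++ [PyV.int p.1]) := by
        intro v hv
        rcases List.mem_append.mp hv with hv | hv
        · exact h _ hv
        · exact ⟨p.1, by simpa using hv⟩
      obtain ⟨e1, e2⟩ := ih (ans + 1) (lst ++ [PyV.int p.1]) h'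
      refine ⟨?_, e2⟩
      rw [e1]; simp [hp]; push_cast; ring
    · rw [if_neg (by simp [hp])]
      obtain ⟨e1, e2⟩ := ih ans lst h
      refine ⟨?_, e2⟩
      rw [e1]; simp [hp]

theorem outer_fold (n : Int) (L : Nat) (A : List (List (Int × Int))) (played lost : List Int)
    (hInv : CInv L A played lost) (is : List Int) (hpos : ∀ i ∈ is, 0 ≤ i)
    (ans : Int) (lst : List PyV) (h : AllInt lst) :
    (is.foldl (fun (st : Int × List PyV) i =>
        let Ai := PySem.List.pyGetD A i []
        if ((Ai.length : Int) == n - 1) then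
          (Ai.foldl solAInner (st.1 + 1, st.2 ++ [PyV.int i]))
        else st) (ans, lst)).1
    = is.foldl (fun acc i =>
        if (PySem.List.pyGetD played i 0 == n - 1) then acc + (1 + PySem.List.pyGetD lost i 0)
        else acc) ans := by
  induction is generalizing ans lst with
  | nil => rfl
  | cons i is' ih =>
    have hi0 : 0 ≤ i := hpos i (by simp)
    obtain ⟨hA, hP, hLo, hK⟩ := hInv
    obtain ⟨hk1, hk2⟩ := hK i.toNat
    have egA : PySem.List.pyGetD A i [] = A.getD i.toNat [] := pyGetD_nonneg _ _ _ hi0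
    have egP : PySem.List.pyGetD played i 0 = ((A.getD i.toNat []).length : Int) := by
      rw [pyGetD_nonneg _ _ _ hi0, ← hk1]
    have egL : PySem.List.pyGetD lost i 0
        = ((A.getD i.toNat []).countP (fun p => p.2 == -1) : Int) := by
      rw [pyGetD_nonneg _ _ _ hi0, ← hk2]
    simp only [List.foldl_cons]
    by_cases hc : ((A.getD i.toNat []).length : Int) = n - 1
    · rw [egA, if_pos (by simpa using hc)]
      have hlst' : AllInt (lst ++ [PyV.int i]) := by
        intro v hv
        rcases List.mem_append.mp hv with hv | hv
        · exact h _ hv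
        · exact ⟨i, by simpa using hv⟩
      obtain ⟨e1, e2⟩ := inner_fold (A.getD i.toNat []) (ans + 1) (lst ++ [PyV.int i]) hlst'
      have hstate : (A.getD i.toNat []).foldl solAInner (ans + 1, lst ++ [PyV.int i])
          = (((A.getD i.toNat []).foldl solAInner (ans + 1, lst ++ [PyV.int i])).1,
             ((A.getD i.toNat []).foldl solAInner (ans + 1, lst ++ [PyV.int i])).2) := rfl
      rw [hstate, e1]
      rw [egP, if_pos (by simpa using hc)]
      rw [ih (fun x hx => hpos x (List.mem_cons_of_mem _ hx)) _ _ e2]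
      congr 1
      rw [egL]; ring
    · rw [egA, if_neg (by simpa using hc), egP, if_neg (by simpa using hc)]
      exact ih (fun x hx => hpos x (List.mem_cons_of_mem _ hx)) ans lst h

-- ===== VERDICT (by name: the statement is the Claim_ definition above) =====
theorem solution_spec : Claim_equal_solution := by
  intro n results _hDom hPre
  unfold Spec_solution solution solution_alt
  have hInv := CInv_fold (n + 1).toNat results
    (List.replicate (n + 1).toNat []) (List.replicate (n + 1).toNat 0)
    (List.replicate (n + 1).toNat 0) (CInv_init _) hPre
  have hpos : ∀ i ∈ PySem.List.pyRange 1 (n + 1) 1, (0 : Int) ≤ i := by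
    intro i hi
    have := (PySem.List.mem_pyRange_one).mp hi
    omega
  exact outer_fold n (n + 1).toNat _ _ _ hInv _ hpos 0 [] (by intro v hv; simp at hv)
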